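-- pv_equiv track=rewrite | github.com/masonacevedo/leetcode_problems_new | 696_Count_Binary_Substrings.py | calculateSplitSize
-- ===== SOURCE A (Python) =====
-- def calculateSplitSize(s, i1, i2):
--     initialLeftChar = s[i1]
--     initialRightChar = s[i2]
--     leftChar = s[i1]
--     rightChar = s[i2]
--
--     ans = 0
--     while i2 < len(s) and i1 >= 0:
--         leftChar = s[i1]
--         rightChar = s[i2]
--         if leftChar == initialLeftChar and rightChar == initialRightChar:
--             ans += 1
--         else:
--             break
--
--
--         i1 -= 1
--         i2 += 1
--
--     return ans
-- ===== SOURCE B (Python) =====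
-- def calculateSplitSize(s, i1, i2):
--     left = s[i1]
--     right = s[i2]
--     L = 0
--     j = i1
--     while j >= 0 and s[j] == left:
--         L += 1
--         j -= 1
--     R = 0
--     k = i2
--     while k < len(s) and s[k] == right:
--         R += 1
--         k += 1
--     return min(L, R)
-- ===== Notes on version B (the rewrite author's own statement) =====
-- stated objective: simpler
-- what changed: Replaces A's single coupled outward scan (advancing both indices in lock-step with a conjunctive break) by two independent run-length scans (leftward run of s[i1], rightward run of s[i2]) combined by min.
import Mathlib
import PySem

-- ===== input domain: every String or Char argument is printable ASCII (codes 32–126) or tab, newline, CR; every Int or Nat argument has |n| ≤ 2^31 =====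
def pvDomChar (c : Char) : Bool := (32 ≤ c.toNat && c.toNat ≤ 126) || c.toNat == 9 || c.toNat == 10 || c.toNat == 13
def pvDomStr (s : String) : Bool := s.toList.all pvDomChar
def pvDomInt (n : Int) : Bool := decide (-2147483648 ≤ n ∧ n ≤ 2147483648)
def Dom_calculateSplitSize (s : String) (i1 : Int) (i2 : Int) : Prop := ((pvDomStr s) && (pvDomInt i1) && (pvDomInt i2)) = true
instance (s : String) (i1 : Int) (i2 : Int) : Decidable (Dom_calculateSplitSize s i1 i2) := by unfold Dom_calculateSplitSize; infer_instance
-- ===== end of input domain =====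

-- B replaces A's coupled outward scan by two independent run-length scans combined by min (objective: simpler).
-- All loops recurse on an explicit Nat fuel that is exactly the number of remaining loop steps (a totality guard only).

-- ===== PORT A =====
-- the while loop of A: state (i1, i2, ans); leftChar/rightChar are re-read each pass;
-- fuel = ((len : Int) - i2).toNat, the number of steps until the guard i2 < len fails
def pvLoopA (cs : List Char) (initL initR : Char) : Nat → Int → Int → Int → Int
  | 0, _, _, ans => ans
  | fuel + 1, i1, i2, ans =>
    if i2 < (cs.length : Int) ∧ 0 ≤ i1 then
      match PySem.List.pyGet? cs i1, PySem.List.pyGet? cs i2 with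
      | some leftChar, some rightChar =>
        if leftChar = initL ∧ rightChar = initR then
          pvLoopA cs initL initR fuel (i1 - 1) (i2 + 1) (ans + 1)
        else ans
      | _, _ => ans  -- unreachable under Pre_: an in-loop IndexError of A
    else ans

def calculateSplitSize (s : String) (i1 : Int) (i2 : Int) : Int :=
  match PySem.Str.pyGet? s i1, PySem.Str.pyGet? s i2 with
  | some initialLeftChar, some initialRightChar =>
      pvLoopA s.toList initialLeftChar initialRightChar
        (((s.toList.length : Int) - i2).toNat) i1 i2 0
  | _, _ => 0  -- Python raises IndexError here; excluded by Pre_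

-- ===== PORT B =====
-- L: length of the run of character c going left (downwards) from index j; fuel = (j + 1).toNat
def pvCountLeft (cs : List Char) (c : Char) : Nat → Int → Int
  | 0, _ => 0
  | fuel + 1, j =>
    if 0 ≤ j ∧ PySem.List.pyGet? cs j = some c then 1 + pvCountLeft cs c fuel (j - 1)
    else 0

-- R: length of the run of character c going right (upwards) from index k; fuel = ((len : Int) - k).toNat
def pvCountRight (cs : List Char) (c : Char) : Nat → Int → Int
  | 0, _ => 0
  | fuel + 1, k =>
    if k < (cs.length : Int) ∧ PySem.List.pyGet? cs k = some c then 1 + pvCountRight cs c fuel (k + 1)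
    else 0

def calculateSplitSize_alt (s : String) (i1 : Int) (i2 : Int) : Int :=
  match PySem.Str.pyGet? s i1, PySem.Str.pyGet? s i2 with
  | some left, some right =>
      min (pvCountLeft s.toList left ((i1 + 1).toNat) i1)
          (pvCountRight s.toList right (((s.toList.length : Int) - i2).toNat) i2)
  | _, _ => 0  -- Python raises IndexError here; excluded by Pre_

-- ===== PRECONDITION & SPEC =====
-- Pre_ excludes exactly the inputs where the eager s[i1]/s[i2] reads raise IndexError (both A and B raise there).
def Pre_calculateSplitSize (s : String) (i1 : Int) (i2 : Int) : Prop :=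
  PySem.Raise.InRange s.length i1 ∧ PySem.Raise.InRange s.length i2
instance (s : String) (i1 : Int) (i2 : Int) : Decidable (Pre_calculateSplitSize s i1 i2) := by
  unfold Pre_calculateSplitSize; infer_instance

def pvWitness_calculateSplitSize : String × Int × Int := ("0011", 1, 2)

def Spec_calculateSplitSize (s : String) (i1 : Int) (i2 : Int) (out : Int) : Prop := out = calculateSplitSize_alt s i1 i2
instance (s : String) (i1 : Int) (i2 : Int) (out : Int) : Decidable (Spec_calculateSplitSize s i1 i2 out) := by unfold Spec_calculateSplitSize; infer_instance

-- ===== CLAIM (what is proved, stated in full; the proofs are below) =====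
def Claim_equal_calculateSplitSize : Prop := ∀ (s : String) (i1 : Int) (i2 : Int), Dom_calculateSplitSize s i1 i2 → Pre_calculateSplitSize s i1 i2 → Spec_calculateSplitSize s i1 i2 (calculateSplitSize s i1 i2)

-- ===== LEMMAS AND PROOFS =====
theorem pvCountLeft_nonneg (cs : List Char) (c : Char) (f : Nat) (j : Int) :
    0 ≤ pvCountLeft cs c f j := by
  induction f generalizing j with
  | zero => simp [pvCountLeft]
  | succ f ih =>
    rw [pvCountLeft]
    split
    · have := ih (j - 1); omega
    · omega

theorem pvCountRight_nonneg (cs : List Char) (c : Char) (f : Nat) (k : Int) :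
    0 ≤ pvCountRight cs c f k := by
  induction f generalizing k with
  | zero => simp [pvCountRight]
  | succ f ih =>
    rw [pvCountRight]
    split
    · have := ih (k + 1); omega
    · omega

-- the coupled loop equals min of the two independent run lengths
theorem pvLoopA_eq_min (cs : List Char) (initL initR : Char) (fR : Nat) (i1 i2 ans : Int)
    (hf : fR = ((cs.length : Int) - i2).toNat) :
    pvLoopA cs initL initR fR i1 i2 ans =
      ans + min (pvCountLeft cs initL ((i1 + 1).toNat) i1) (pvCountRight cs initR fR i2) := by
  induction fR generalizing i1 i2 ans with
  | zero =>
    rw [pvLoopA, pvCountRight]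
    have := pvCountLeft_nonneg cs initL ((i1 + 1).toNat) i1
    omega
  | succ fR ih =>
    have hi2 : i2 < (cs.length : Int) := by omega
    rw [pvLoopA]
    by_cases hi1 : 0 ≤ i1
    · rw [if_pos ⟨hi2, hi1⟩]
      split
      case _ l r hL hR =>
        split
        case isTrue heq =>
          rw [ih (i1 - 1) (i2 + 1) (ans + 1) (by omega)]
          have hn1 : (i1 + 1).toNat = (i1 - 1 + 1).toNat + 1 := by omega
          rw [hn1, pvCountLeft, pvCountRight]
          rw [if_pos ⟨hi1, by rw [hL, heq.1]⟩, if_pos ⟨hi2, by rw [hR, heq.2]⟩]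
          have := pvCountLeft_nonneg cs initL ((i1 - 1 + 1).toNat) (i1 - 1)
          have := pvCountRight_nonneg cs initR fR (i2 + 1)
          omega
        case isFalse hne =>
          by_cases hl : l = initL
          · have hr : ¬ r = initR := fun hr => hne ⟨hl, hr⟩
            rw [pvCountRight]
            have : ¬ (i2 < (cs.length : Int) ∧ PySem.List.pyGet? cs i2 = some initR) := by
              rintro ⟨-, hc⟩; rw [hR] at hc; exact hr (Option.some.inj hc)
            rw [if_neg this]
            have := pvCountLeft_nonneg cs initL ((i1 + 1).toNat) i1
            omega
          · have hn1 : (i1 + 1).toNat = i1.toNat + 1 := by omega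
            rw [hn1, pvCountLeft]
            have : ¬ (0 ≤ i1 ∧ PySem.List.pyGet? cs i1 = some initL) := by
              rintro ⟨-, hc⟩; rw [hL] at hc; exact hl (Option.some.inj hc)
            rw [if_neg this]
            have := pvCountRight_nonneg cs initR (fR + 1) i2
            omega
      case _ hno =>
        -- at least one of the two reads is none: the corresponding run is 0
        rcases hL : PySem.List.pyGet? cs i1 with _ | l
        · have hn1 : (i1 + 1).toNat = i1.toNat + 1 := by omega
          rw [hn1, pvCountLeft]
          have : ¬ (0 ≤ i1 ∧ PySem.List.pyGet? cs i1 = some initL) := by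
            rintro ⟨-, hc⟩; rw [hL] at hc; simp at hc
          rw [if_neg this]
          have := pvCountRight_nonneg cs initR (fR + 1) i2
          omega
        · rcases hR : PySem.List.pyGet? cs i2 with _ | r
          · rw [pvCountRight]
            have : ¬ (i2 < (cs.length : Int) ∧ PySem.List.pyGet? cs i2 = some initR) := by
              rintro ⟨-, hc⟩; rw [hR] at hc; simp at hc
            rw [if_neg this]
            have := pvCountLeft_nonneg cs initL ((i1 + 1).toNat) i1
            omega
          · exact (hno l r hL hR).elim
    · rw [if_neg (fun h => hi1 h.2)]
      have h0 : (i1 + 1).toNat = 0 := by omega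
      rw [h0, pvCountLeft]
      have := pvCountRight_nonneg cs initR (fR + 1) i2
      omega

-- ===== VERDICT (by name: the statement is the Claim_ definition above) =====
theorem calculateSplitSize_spec : Claim_equal_calculateSplitSize := by
  intro s i1 i2 _ _
  unfold Spec_calculateSplitSize calculateSplitSize calculateSplitSize_alt
  rcases PySem.Str.pyGet? s i1 with _ | l <;> rcases PySem.Str.pyGet? s i2 with _ | r <;> simp
  rw [pvLoopA_eq_min s.toList l r (((s.length : Int) - i2).toNat) i1 i2 0 (by simp)]
  omega
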